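-- pv_equiv track=rewrite | github.com/OsProgramadores/op-desafios | desafio-06/AlexPHorta/python/desafio06.py | shrink_search_field
-- ===== SOURCE A (Python) =====
-- import string
--
-- def shrink_search_field(expression, words_file):
--     """Shrink the search field for possible anagrams, before considering partitions of expression."""
--     res = []
--     for w in words_file:
--         w = w.strip()
--         le = sieve_less_or_equal(expression, w)
--         sw = sieve_starts_with(expression, w)
--         rm = sieve_remaining(expression, w)
--         ql = sieve_number_of_letters(expression, w)
--         if all((le, sw, rm, ql)):
--             res.append(w)
--     return res
--
-- def sieve_number_of_letters(expression, word):
--     """Check if a word is contained in expression. Remove those that can't be."""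
--     e = quant_letters(expression)
--     w = quant_letters(word)
--     for k, v in w.items():
--         if e.get(k) is not None and v > e[k]:
--             return False
--     return True
--
-- def quant_letters(a_word):
--     """Return the number of the different letters in a word."""
--     keys = set(a_word)
--     quanto = {k:0 for k in keys}
--     for l in a_word:
--         quanto[l] += 1
--     return quanto
--
-- def sieve_remaining(expression, word):
--     """Remove any word that has letters that are not in expression."""
--     letters = set(expression)
--     uppercase = set(string.ascii_uppercase)
--     remaining = uppercase - letters
--     return not any([(l in remaining) for l in word])
--
-- def sieve_starts_with(expression, word):
--     """Return only words that begin with one of the letters in expression."""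
--     letters = set(expression)
--     return any([word.startswith(l) for l in letters])
--
-- def sieve_less_or_equal(expression, word):
--     """Exclude words that are lengthier than expression."""
--     return len(expression) >= len(word)
-- ===== SOURCE B (Python) =====
-- import string
--
-- def shrink_search_field(expression, words_file):
--     """Shrink the search field for possible anagrams, before considering partitions of expression."""
--     e_counts = {}
--     for c in expression:
--         e_counts[c] = e_counts.get(c, 0) + 1
--     e_set = set(e_counts)
--     bad = set(string.ascii_uppercase) - e_set
--     n = len(expression)
--     res = []
--     for raw in words_file:
--         w = raw.strip()
--         if len(w) <= n and w and w[0] in e_set and _fits(w, e_counts, bad):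
--             res.append(w)
--     return res
--
-- def _fits(w, e_counts, bad):
--     """Single pass: no disallowed uppercase letter, and counts never exceed expression's for shared letters."""
--     counts = {}
--     for c in w:
--         if c in bad:
--             return False
--         counts[c] = counts.get(c, 0) + 1
--         limit = e_counts.get(c)
--         if limit is not None and counts[c] > limit:
--             return False
--     return True
-- ===== Notes on version B (the rewrite author's own statement) =====
-- stated objective: faster
-- what changed: B precomputes the expression's letter counts, letter set and the disallowed-uppercase set once before the loop, then vets each word in one short-circuiting pass (first-char set lookup, length bound, and a single scan that builds the word's counts while checking bad letters and count limits), instead of A's four per-word sieves that each rebuild expression sets/count dicts and make separate full passes over the word.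
import Mathlib
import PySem

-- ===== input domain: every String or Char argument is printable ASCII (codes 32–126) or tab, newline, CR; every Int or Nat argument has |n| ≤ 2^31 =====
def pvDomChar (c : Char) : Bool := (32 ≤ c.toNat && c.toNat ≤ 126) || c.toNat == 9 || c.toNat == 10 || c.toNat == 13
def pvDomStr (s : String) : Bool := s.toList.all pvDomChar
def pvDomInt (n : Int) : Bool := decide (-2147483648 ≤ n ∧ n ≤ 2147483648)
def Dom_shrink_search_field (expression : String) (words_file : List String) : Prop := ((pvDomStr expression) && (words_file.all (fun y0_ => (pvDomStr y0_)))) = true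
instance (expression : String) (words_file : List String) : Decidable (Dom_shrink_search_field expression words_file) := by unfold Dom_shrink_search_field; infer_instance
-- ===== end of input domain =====

-- B hoists the expression's letter counts / letter set / disallowed-uppercase set out of the loop and
-- vets each word in one short-circuiting pass instead of A's four per-word sieves (objective: faster, constant-factor).


def pvUppercase : List Char := "ABCDEFGHIJKLMNOPQRSTUVWXYZ".toList

-- ===== PORT A =====

-- quant_letters: keys = set(a_word); quanto = {k:0 for k in keys}; for l in a_word: quanto[l] += 1
-- (the += on quanto[l] never misses: l ∈ keys, so modify with default 0 is exact here)
def quant_letters (a_word : List Char) : PySem.Dict Char Int :=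
  -- keys = set(a_word); quanto = {k:0 for k in keys}; then the += loop
  a_word.foldl (fun d l => d.modify l 0 (· + 1))
    ((PySem.Set.ofList a_word).foldl (fun d k => d.insert k 0)
      (PySem.Dict.empty : PySem.Dict Char Int))

-- the 'for k, v in w.items(): if e.get(k) is not None and v > e[k]: return False' loop
def snl_go (e : PySem.Dict Char Int) : List (Char × Int) → Bool
  | [] => true
  | (k, v) :: rest =>
      match e.get? k with
      | some ev => if v > ev then false else snl_go e rest
      | none => snl_go e rest

def sieve_number_of_letters (expression word : List Char) : Bool :=
  let e := quant_letters expression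
  let w := quant_letters word
  snl_go e w.items

def sieve_remaining (expression word : List Char) : Bool :=
  let letters : PySem.Set Char := PySem.Set.ofList expression
  let uppercase : PySem.Set Char := PySem.Set.ofList pvUppercase
  let remaining : PySem.Set Char := PySem.Set.diff uppercase letters
  !(word.any (fun l => PySem.Set.contains remaining l))

-- any([word.startswith(l) for l in letters]) — a set consumed by 'any', order-independent
def sieve_starts_with (expression word : List Char) : Bool :=
  let letters : PySem.Set Char := PySem.Set.ofList expression
  letters.any (fun l => PySem.Chars.startswith word [l])

def sieve_less_or_equal (expression word : List Char) : Bool :=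
  decide (PySem.Chars.len expression ≥ PySem.Chars.len word)

def shrink_search_field (expression : String) (words_file : List String) : List String :=
  words_file.foldl (fun res w0 =>
    let w := PySem.Str.strip w0
    let le := sieve_less_or_equal expression.toList w.toList
    let sw := sieve_starts_with expression.toList w.toList
    let rm := sieve_remaining expression.toList w.toList
    let ql := sieve_number_of_letters expression.toList w.toList
    if le && sw && rm && ql then res ++ [w] else res) []

-- ===== PORT B =====

-- _fits(w, e_counts, bad): one pass, early exit on a bad letter or an exceeded count
def pvFits (eCounts : PySem.Dict Char Int) (bad : PySem.Set Char) :
    List Char → PySem.Dict Char Int → Bool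
  | [], _ => true
  | c :: rest, counts =>
      if PySem.Set.contains bad c then false
      else
        let counts' := counts.insert c (counts.getD c 0 + 1)
        match eCounts.get? c with
        | some limit =>
            if counts'.getD c 0 > limit then false else pvFits eCounts bad rest counts'
        | none => pvFits eCounts bad rest counts'

def shrink_search_field_alt (expression : String) (words_file : List String) : List String :=
  let eCounts : PySem.Dict Char Int :=
    expression.toList.foldl (fun d c => d.insert c (d.getD c 0 + 1)) PySem.Dict.empty
  let eSet : PySem.Set Char := PySem.Set.ofList eCounts.keys
  let bad : PySem.Set Char := PySem.Set.diff (PySem.Set.ofList pvUppercase) eSet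
  let n := PySem.Chars.len expression.toList
  words_file.foldl (fun res raw =>
    let w := PySem.Str.strip raw
    let ok := decide (PySem.Chars.len w.toList ≤ n) &&
              (match w.toList with
               | [] => false
               | c :: _ => PySem.Set.contains eSet c) &&
              pvFits eCounts bad w.toList PySem.Dict.empty
    if ok then res ++ [w] else res) []

-- ===== PRECONDITION & SPEC =====
def Spec_shrink_search_field (expression : String) (words_file : List String) (out : List String) : Prop := out = shrink_search_field_alt expression words_file
instance (expression : String) (words_file : List String) (out : List String) : Decidable (Spec_shrink_search_field expression words_file out) := by unfold Spec_shrink_search_field; infer_instance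

-- ===== CLAIM (what is proved, stated in full; the proofs are below) =====
def Claim_equal_shrink_search_field : Prop := ∀ (expression : String) (words_file : List String), Dom_shrink_search_field expression words_file → Spec_shrink_search_field expression words_file (shrink_search_field expression words_file)

-- ===== LEMMAS AND PROOFS =====
-- characterization of a lookup in both letter-count dicts
def pvCnt (l : List Char) (k : Char) : Option Int :=
  if k ∈ l then some ((l.count k : Int)) else none

theorem pv_get?_eq_some_getD (d : PySem.Dict Char Int) (k : Char)
    (h : d.contains k = true) : d.get? k = some (d.getD k 0) := by
  rw [PySem.Dict.contains_eq_isSome_get?] at h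
  cases hg : d.get? k with
  | none => rw [hg] at h; simp at h
  | some v => simp [PySem.Dict.getD, hg]

theorem pv_getD_zero_init (l : List Char) (d : PySem.Dict Char Int)
    (h : ∀ k, d.getD k 0 = 0) (k : Char) :
    (l.foldl (fun d k => d.insert k 0) d).getD k 0 = 0 := by
  induction l generalizing d with
  | nil => exact h k
  | cons x xs ih =>
      simp only [List.foldl_cons]
      exact ih _ (fun k' => by rw [PySem.Dict.getD_insert]; split <;> simp [h])

theorem pv_ec_get? (e : List Char) (k : Char) :
    (e.foldl (fun d c => d.insert c (d.getD c 0 + 1)) (PySem.Dict.empty : PySem.Dict Char Int)).get? k = pvCnt e k := by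
  have hkeys : (e.foldl (fun d c => d.insert c (d.getD c 0 + 1)) (PySem.Dict.empty : PySem.Dict Char Int)).keys
      = PySem.Set.ofList e := by
    rw [PySem.Dict.keys_foldl_insert]
    simp [PySem.Dict.keys_empty, PySem.Set.update_nil_left]
  have hc : (e.foldl (fun d c => d.insert c (d.getD c 0 + 1)) (PySem.Dict.empty : PySem.Dict Char Int)).contains k
      = decide (k ∈ e) := by
    rw [PySem.Dict.contains_eq_decide_mem_keys, hkeys]
    simp [PySem.Set.mem_ofList]
  have hgd : (e.foldl (fun d c => d.insert c (d.getD c 0 + 1)) (PySem.Dict.empty : PySem.Dict Char Int)).getD k 0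
      = (e.count k : Int) := by
    rw [PySem.Dict.getD_foldl_insert_add_one]; simp [PySem.Dict.getD_empty]
  unfold pvCnt
  by_cases hm : k ∈ e
  · have hcT := hc.trans (by simp [hm] : decide (k ∈ e) = true)
    rw [pv_get?_eq_some_getD _ _ hcT, hgd]; simp [hm]
  · have : (e.foldl (fun d c => d.insert c (d.getD c 0 + 1)) (PySem.Dict.empty : PySem.Dict Char Int)).get? k = none := by
      rw [PySem.Dict.get?_eq_none_iff_contains]
      exact hc.trans (by simp [hm])
    exact this.trans (by simp [hm])

theorem pv_quant_get? (w : List Char) (k : Char) :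
    (quant_letters w).get? k = pvCnt w k := by
  unfold quant_letters
  have hkq : ((PySem.Set.ofList w).foldl (fun d k => d.insert k 0) (PySem.Dict.empty : PySem.Dict Char Int)).keys
      = PySem.Set.ofList w := by
    rw [PySem.Dict.keys_foldl_insert]
    simp [PySem.Dict.keys_empty, PySem.Set.update_nil_left, PySem.Set.ofList_ofList]
  have hkeys : (w.foldl (fun d l => d.modify l 0 (· + 1))
      ((PySem.Set.ofList w).foldl (fun d k => d.insert k 0) (PySem.Dict.empty : PySem.Dict Char Int))).keys
      = PySem.Set.update (PySem.Set.ofList w) w := by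
    rw [PySem.Dict.keys_foldl_modify, hkq]
  have hc : (w.foldl (fun d l => d.modify l 0 (· + 1))
      ((PySem.Set.ofList w).foldl (fun d k => d.insert k 0) (PySem.Dict.empty : PySem.Dict Char Int))).contains k
      = decide (k ∈ w) := by
    rw [PySem.Dict.contains_eq_decide_mem_keys, hkeys]
    simp [PySem.Set.mem_update, PySem.Set.mem_ofList]
  have hgd : (w.foldl (fun d l => d.modify l 0 (· + 1))
      ((PySem.Set.ofList w).foldl (fun d k => d.insert k 0) (PySem.Dict.empty : PySem.Dict Char Int))).getD k 0
      = (w.count k : Int) := by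
    rw [PySem.Dict.getD_foldl_modify_add_one,
        pv_getD_zero_init _ _ (fun k' => by simp [PySem.Dict.getD_empty])]
    simp
  unfold pvCnt
  by_cases hm : k ∈ w
  · have hcT := hc.trans (by simp [hm] : decide (k ∈ w) = true)
    rw [pv_get?_eq_some_getD _ _ hcT, hgd]; simp [hm]
  · have : (w.foldl (fun d l => d.modify l 0 (· + 1))
        ((PySem.Set.ofList w).foldl (fun d k => d.insert k 0) (PySem.Dict.empty : PySem.Dict Char Int))).get? k = none := by
      rw [PySem.Dict.get?_eq_none_iff_contains]
      exact hc.trans (by simp [hm])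
    exact this.trans (by simp [hm])
-- abbreviations for B's precomputed data (proof-only helpers)
def pvEC (e : List Char) : PySem.Dict Char Int :=
  e.foldl (fun d c => d.insert c (d.getD c 0 + 1)) PySem.Dict.empty

def pvBad (e : List Char) : PySem.Set Char :=
  PySem.Set.diff (PySem.Set.ofList pvUppercase) (PySem.Set.ofList (pvEC e).keys)

theorem pv_ec_keys (e : List Char) : (pvEC e).keys = PySem.Set.ofList e := by
  unfold pvEC
  rw [PySem.Dict.keys_foldl_insert]
  simp [PySem.Dict.keys_empty, PySem.Set.update_nil_left]

theorem pv_ec_get?' (e : List Char) (k : Char) : (pvEC e).get? k = pvCnt e k :=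
  pv_ec_get? e k

theorem pv_bad_contains (e : List Char) (c : Char) :
    PySem.Set.contains (pvBad e) c = decide (c ∈ pvUppercase ∧ c ∉ e) := by
  rw [Bool.eq_iff_iff]
  simp [pvBad, PySem.Set.mem_diff, PySem.Set.mem_ofList, pv_ec_keys]

theorem pv_snl_go_iff (e : PySem.Dict Char Int) (l : List (Char × Int)) :
    snl_go e l = true ↔ ∀ p ∈ l, ∀ ev, e.get? p.1 = some ev → p.2 ≤ ev := by
  induction l with
  | nil => simp [snl_go]
  | cons p rest ih =>
      obtain ⟨k, v⟩ := p
      rw [snl_go]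
      cases hg : e.get? k with
      | some ev =>
          by_cases hv : v > ev
          · simp only [hv, if_true]
            constructor
            · intro h; exact absurd h (by simp)
            · intro h
              have := h (k, v) (by simp) ev hg
              omega
          · simp only [hv, if_false, ih, List.forall_mem_cons]
            constructor
            · intro h
              refine ⟨fun ev' hg' => ?_, h⟩
              rw [hg] at hg'
              injection hg' with he
              omega
            · intro h; exact h.2
      | none =>
          simp only [ih, List.forall_mem_cons]
          constructor
          · intro h
            exact ⟨fun ev' hg' => by rw [hg] at hg'; exact absurd hg' (by simp), h⟩
          · intro h; exact h.2

theorem pv_quant_keys_mem (w : List Char) (k : Char) :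
    k ∈ (quant_letters w).keys ↔ k ∈ w := by
  unfold quant_letters
  rw [PySem.Dict.keys_foldl_modify, PySem.Dict.keys_foldl_insert]
  simp [PySem.Dict.keys_empty, PySem.Set.update_nil_left, PySem.Set.mem_update,
        PySem.Set.mem_ofList, PySem.Set.ofList_ofList]

theorem pv_quant_keys_nodup (w : List Char) : (quant_letters w).keys.Nodup := by
  unfold quant_letters
  apply PySem.Dict.nodup_keys_foldl_modify_key w (fun x => x) 0 (fun _ _ => (· + 1))
  apply PySem.Dict.nodup_keys_foldl_insert
  simp [PySem.Dict.keys_empty]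

theorem pv_quant_getD (w : List Char) (k : Char) :
    (quant_letters w).getD k 0 = (w.count k : Int) := by
  unfold quant_letters
  rw [PySem.Dict.getD_foldl_modify_add_one,
      pv_getD_zero_init _ _ (fun k' => by simp [PySem.Dict.getD_empty])]
  simp

theorem pv_ql_iff (e w : List Char) :
    sieve_number_of_letters e w = true ↔
      ∀ c ∈ w, ∀ ev, (quant_letters e).get? c = some ev → (w.count c : Int) ≤ ev := by
  unfold sieve_number_of_letters
  rw [pv_snl_go_iff,
      PySem.Dict.items_eq_map_keys (quant_letters w) (pv_quant_keys_nodup w) 0]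
  constructor
  · intro h c hc ev hg
    have := h (c, (quant_letters w).getD c 0)
      (List.mem_map.mpr ⟨c, (pv_quant_keys_mem w c).mpr hc, rfl⟩) ev hg
    rwa [pv_quant_getD] at this
  · intro h p hp ev hg
    obtain ⟨k, hk, rfl⟩ := List.mem_map.mp hp
    rw [pv_quant_getD]
    exact h k ((pv_quant_keys_mem w k).mp hk) ev hg

theorem pv_rm_iff (e w : List Char) :
    sieve_remaining e w = true ↔ ∀ c ∈ w, ¬(c ∈ pvUppercase ∧ c ∉ e) := by
  unfold sieve_remaining
  simp [List.any_eq_false, PySem.Set.mem_diff, PySem.Set.mem_ofList]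

theorem pv_sw_eq (e w : List Char) :
    sieve_starts_with e w =
      (match w with
       | [] => false
       | c :: _ => PySem.Set.contains (PySem.Set.ofList e) c) := by
  unfold sieve_starts_with
  cases w with
  | nil => simp [List.any_eq_false, PySem.Chars.startswith_iff]
  | cons c rest =>
      simp only []
      rw [Bool.eq_iff_iff]
      simp only [List.any_eq_true, PySem.Chars.startswith_iff, PySem.Set.contains_iff]
      constructor
      · rintro ⟨l, hl, hpre⟩
        rcases (List.cons_prefix_cons.mp hpre) with ⟨rfl, -⟩
        exact hl
      · intro hc
        exact ⟨c, hc, List.cons_prefix_cons.mpr ⟨rfl, List.nil_prefix⟩⟩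

-- shifting one processed letter from the word into the running count dict
theorem pv_shift (e rest : List Char) (c : Char) (acc : PySem.Dict Char Int)
    (hle : c ∈ e → acc.getD c 0 + 1 ≤ (e.count c : Int)) :
    ((∀ x ∈ rest, x ∈ e →
        (acc.insert c (acc.getD c 0 + 1)).getD x 0 + (rest.count x : Int) ≤ (e.count x : Int)) ↔
     (∀ x ∈ c :: rest, x ∈ e →
        acc.getD x 0 + ((c :: rest).count x : Int) ≤ (e.count x : Int))) := by
  constructor
  · intro h x hx hxe
    by_cases hxc : x = c
    · subst hxc
      rw [List.count_cons_self]
      by_cases hxr : x ∈ rest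
      · have := h x hxr hxe
        rw [PySem.Dict.getD_insert_self] at this
        push_cast at *
        omega
      · rw [List.count_eq_zero_of_not_mem hxr]
        have := hle hxe
        push_cast
        omega
    · have hx' : x ∈ rest := by
        rcases List.mem_cons.mp hx with h' | h'
        · exact absurd h' hxc
        · exact h'
      have := h x hx' hxe
      rw [PySem.Dict.getD_insert, if_neg hxc] at this
      rwa [List.count_cons_of_ne (Ne.symm hxc)]
  · intro h x hx hxe
    by_cases hxc : x = c
    · subst hxc
      have := h x (List.mem_cons_self) hxe
      rw [List.count_cons_self] at this
      rw [PySem.Dict.getD_insert_self]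
      push_cast at *
      omega
    · have := h x (List.mem_cons_of_mem _ hx) hxe
      rw [List.count_cons_of_ne (Ne.symm hxc)] at this
      rw [PySem.Dict.getD_insert, if_neg hxc]
      exact this

theorem pv_fits_iff (e : List Char) (ws : List Char) :
    ∀ (acc : PySem.Dict Char Int),
    pvFits (pvEC e) (pvBad e) ws acc = true ↔
      ((∀ x ∈ ws, ¬(x ∈ pvUppercase ∧ x ∉ e)) ∧
       (∀ x ∈ ws, x ∈ e → acc.getD x 0 + (ws.count x : Int) ≤ (e.count x : Int))) := by
  induction ws with
  | nil => intro acc; simp [pvFits]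
  | cons c rest ih =>
      intro acc
      rw [pvFits, pv_bad_contains]
      by_cases hbad : c ∈ pvUppercase ∧ c ∉ e
      · rw [if_pos (by simp [hbad])]
        constructor
        · intro h; exact absurd h (by simp)
        · rintro ⟨h1, -⟩; exact absurd hbad (h1 c (by simp))
      · rw [if_neg (by simp [hbad])]
        cases hg : (pvEC e).get? c with
        | none =>
            have hce : c ∉ e := by
              rw [pv_ec_get?', pvCnt] at hg
              by_contra hmem; simp [hmem] at hg
            show pvFits (pvEC e) (pvBad e) rest (acc.insert c (acc.getD c 0 + 1)) = true ↔ _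
            rw [ih, pv_shift e rest c acc (fun hmem => absurd hmem hce)]
            simp only [List.forall_mem_cons]
            tauto
        | some ev =>
            have hce : c ∈ e ∧ ev = (e.count c : Int) := by
              rw [pv_ec_get?', pvCnt] at hg
              by_cases hmem : c ∈ e
              · simp [hmem] at hg; exact ⟨hmem, hg.symm⟩
              · simp [hmem] at hg
            obtain ⟨hce, rfl⟩ := hce
            show (if (acc.insert c (acc.getD c 0 + 1)).getD c 0 > (e.count c : Int) then false
                  else pvFits (pvEC e) (pvBad e) rest (acc.insert c (acc.getD c 0 + 1))) = true ↔ _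
            rw [PySem.Dict.getD_insert_self]
            by_cases hov : acc.getD c 0 + 1 > (e.count c : Int)
            · rw [if_pos hov]
              constructor
              · intro h; exact absurd h (by simp)
              · rintro ⟨-, h2⟩
                have := h2 c (by simp) hce
                rw [List.count_cons_self] at this
                push_cast at this
                omega
            · rw [if_neg hov]
              rw [ih, pv_shift e rest c acc (fun _ => by omega)]
              simp only [List.forall_mem_cons]
              tauto
theorem pv_match_eq (e w : List Char) :
    (match w with
     | [] => false
     | c :: _ => PySem.Set.contains (PySem.Set.ofList (pvEC e).keys) c)
    = sieve_starts_with e w := by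
  rw [pv_sw_eq]
  cases w with
  | nil => rfl
  | cons c rest => simp only [pv_ec_keys, PySem.Set.ofList_ofList]

theorem pv_word_eq (e w : List Char) :
    (sieve_less_or_equal e w && sieve_starts_with e w && sieve_remaining e w &&
      sieve_number_of_letters e w)
    = (decide (PySem.Chars.len w ≤ PySem.Chars.len e) &&
       (match w with
        | [] => false
        | c :: _ => PySem.Set.contains (PySem.Set.ofList (pvEC e).keys) c) &&
       pvFits (pvEC e) (pvBad e) w PySem.Dict.empty) := by
  have h1 : sieve_less_or_equal e w = decide (PySem.Chars.len w ≤ PySem.Chars.len e) := rfl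
  have h3 : (sieve_remaining e w && sieve_number_of_letters e w)
      = pvFits (pvEC e) (pvBad e) w PySem.Dict.empty := by
    rw [Bool.eq_iff_iff, Bool.and_eq_true, pv_rm_iff, pv_ql_iff, pv_fits_iff]
    constructor
    · rintro ⟨hr, hq⟩
      refine ⟨hr, fun x hx hxe => ?_⟩
      have hg : (quant_letters e).get? x = some ((e.count x : Int)) := by
        rw [pv_quant_get?, pvCnt]; simp [hxe]
      have := hq x hx ((e.count x : Int)) hg
      rw [PySem.Dict.getD_empty]
      omega
    · rintro ⟨hr, hq⟩
      refine ⟨hr, fun x hx ev hg => ?_⟩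
      rw [pv_quant_get?, pvCnt] at hg
      by_cases hxe : x ∈ e
      · simp only [hxe, if_pos] at hg
        injection hg with he
        have := hq x hx hxe
        rw [PySem.Dict.getD_empty] at this
        omega
      · simp [hxe] at hg
  rw [pv_match_eq, ← h3, ← h1]
  exact Bool.and_assoc _ _ _
-- ===== VERDICT (by name: the statement is the Claim_ definition above) =====
theorem shrink_search_field_spec : Claim_equal_shrink_search_field := by
  intro expression words_file _
  unfold Spec_shrink_search_field shrink_search_field shrink_search_field_alt
  show words_file.foldl
      (fun res w0 =>
        if (sieve_less_or_equal expression.toList (PySem.Str.strip w0).toList &&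
            sieve_starts_with expression.toList (PySem.Str.strip w0).toList &&
            sieve_remaining expression.toList (PySem.Str.strip w0).toList &&
            sieve_number_of_letters expression.toList (PySem.Str.strip w0).toList)
        then res ++ [PySem.Str.strip w0] else res) []
    = words_file.foldl
      (fun res raw =>
        if (decide (PySem.Chars.len (PySem.Str.strip raw).toList ≤ PySem.Chars.len expression.toList) &&
            (match (PySem.Str.strip raw).toList with
             | [] => false
             | c :: _ => PySem.Set.contains (PySem.Set.ofList (pvEC expression.toList).keys) c) &&
            pvFits (pvEC expression.toList) (pvBad expression.toList)
              (PySem.Str.strip raw).toList PySem.Dict.empty)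
        then res ++ [PySem.Str.strip raw] else res) []
  apply PySem.List.foldl_congr_mem
  intro acc w0 hw
  simp only [pv_word_eq]
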